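-- pv_equiv track=rewrite | github.com/keithhetrick/music-advisor | tools/hci_compare_targets.py | _fix_contractions
-- ===== SOURCE A (Python) =====
-- def _fix_contractions(norm: str) -> str:
--     tokens = norm.split()
--     out = []
--     i = 0
--     while i < len(tokens):
--         if i + 1 < len(tokens):
--             pair = (tokens[i], tokens[i + 1])
--
--             if pair[0] in {
--                 "don", "can", "didn", "doesn",
--                 "isn", "wasn", "shouldn", "couldn",
--                 "wouldn", "ain"
--             } and pair[1] == "t":
--                 out.append(pair[0] + "t")
--                 i += 2
--                 continue
--
--             if pair == ("let", "s"):
--                 out.append("lets")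
--                 i += 2
--                 continue
--
--         out.append(tokens[i])
--         i += 1
--
--     return " ".join(out)
-- ===== SOURCE B (Python) =====
-- _STEMS = {"don", "can", "didn", "doesn", "isn", "wasn", "shouldn", "couldn", "wouldn", "ain"}
--
--
-- def _merge(a, b):
--     return (a in _STEMS and b == "t") or (a, b) == ("let", "s")
--
--
-- def _fix_contractions(norm: str) -> str:
--     toks = norm.split()
--     # Matches can never overlap (a second token "t"/"s" is never a stem or "let"),
--     # so all merge positions can be marked at once, with no sequential consuming state.
--     mset = {i for i, (a, b) in enumerate(zip(toks, toks[1:])) if _merge(a, b)}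
--     out = [t + toks[i + 1] if i in mset else t
--            for i, t in enumerate(toks) if i - 1 not in mset]
--     return " ".join(out)
-- ===== Notes on version B (the rewrite author's own statement) =====
-- stated objective: alternative
-- what changed: Replaced A's stateful index-advancing consume-1-or-2 while-loop by a stateless two-stage marking algorithm: first compute the set of all merge positions over zipped adjacent pairs (correct because matches can never overlap), then emit tokens by a comprehension that merges at marked positions and skips their successors.
import Mathlib
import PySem

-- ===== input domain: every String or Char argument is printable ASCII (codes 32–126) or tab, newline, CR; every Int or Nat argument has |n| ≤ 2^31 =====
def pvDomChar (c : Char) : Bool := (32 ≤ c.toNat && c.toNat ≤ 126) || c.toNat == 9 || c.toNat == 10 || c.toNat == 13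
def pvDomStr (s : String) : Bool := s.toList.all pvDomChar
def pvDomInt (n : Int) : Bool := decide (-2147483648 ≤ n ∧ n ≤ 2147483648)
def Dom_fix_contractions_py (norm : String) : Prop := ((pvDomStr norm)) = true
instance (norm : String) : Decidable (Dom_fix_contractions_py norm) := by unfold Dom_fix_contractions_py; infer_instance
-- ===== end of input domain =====

-- B replaces A's stateful consume-1-or-2 while-loop by a stateless two-stage marking
-- algorithm (mark all merge positions at once, then emit); objective: alternative.

-- ===== PORT A =====
-- the set literal of contraction stems tested by `pair[0] in {...}`
def pvStemsA : PySem.Set String :=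
  PySem.Set.ofList ["don", "can", "didn", "doesn", "isn", "wasn", "shouldn", "couldn", "wouldn", "ain"]

-- the `while i < len(tokens)` loop: state = (tokens, i, out); consumes 1 or 2 tokens per step
def pvLoopA (tokens : List String) (i : Nat) (out : List String) : List String :=
  if i < tokens.length then
    if i + 1 < tokens.length then
      let p0 := tokens.getD i ""
      let p1 := tokens.getD (i + 1) ""
      if p0 ∈ pvStemsA ∧ p1 = "t" then
        pvLoopA tokens (i + 2) (out ++ [p0 ++ "t"])
      else if p0 = "let" ∧ p1 = "s" then
        pvLoopA tokens (i + 2) (out ++ ["lets"])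
      else
        pvLoopA tokens (i + 1) (out ++ [tokens.getD i ""])
    else
      pvLoopA tokens (i + 1) (out ++ [tokens.getD i ""])
  else out
termination_by tokens.length - i

def fix_contractions_py (norm : String) : String :=
  PySem.Str.join " " (pvLoopA (PySem.Str.split₀ norm) 0 [])

-- ===== PORT B =====
def pvStemsB : PySem.Set String :=
  PySem.Set.ofList ["don", "can", "didn", "doesn", "isn", "wasn", "shouldn", "couldn", "wouldn", "ain"]

-- `_merge(a, b)`
def pvMergeB (a b : String) : Bool :=
  (PySem.Set.contains pvStemsB a && b == "t") || (a == "let" && b == "s")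

-- the set comprehension `{i for i, (a, b) in enumerate(zip(toks, toks[1:])) if _merge(a, b)}`
def pvMsetB (toks : List String) : PySem.Set Int :=
  PySem.Set.ofList
    (((PySem.List.enumerate (toks.zip toks.tail) 0).filter (fun p => pvMergeB p.2.1 p.2.2)).map (·.1))

def fix_contractions_py_alt (norm : String) : String :=
  let toks := PySem.Str.split₀ norm
  let mset := pvMsetB toks
  -- `[t + toks[i+1] if i in mset else t for i, t in enumerate(toks) if i - 1 not in mset]`
  -- (toks[i+1] is accessed only when i ∈ mset, hence in range: getD is exact there)
  let out := ((PySem.List.enumerate toks 0).filter (fun p => !(PySem.Set.contains mset (p.1 - 1)))).map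
      (fun p => if PySem.Set.contains mset p.1 then p.2 ++ toks.getD (p.1 + 1).toNat "" else p.2)
  PySem.Str.join " " out

-- ===== PRECONDITION & SPEC =====
def Spec_fix_contractions_py (norm : String) (out : String) : Prop := out = fix_contractions_py_alt norm
instance (norm : String) (out : String) : Decidable (Spec_fix_contractions_py norm out) := by unfold Spec_fix_contractions_py; infer_instance

-- ===== CLAIM (what is proved, stated in full; the proofs are below) =====
def Claim_equal_fix_contractions_py : Prop := ∀ (norm : String), Dom_fix_contractions_py norm → Spec_fix_contractions_py norm (fix_contractions_py norm)

-- ===== LEMMAS AND PROOFS =====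

-- B's emission pipeline restricted to the token suffix starting at index i
def pvTailB (toks : List String) (i : Nat) : List String :=
  ((PySem.List.enumerate (toks.drop i) i).filter
      (fun p => !(PySem.Set.contains (pvMsetB toks) (p.1 - 1)))).map
    (fun p => if PySem.Set.contains (pvMsetB toks) p.1 then p.2 ++ toks.getD (p.1 + 1).toNat "" else p.2)

lemma mem_mset_iff (toks : List String) (j : Int) :
    PySem.Set.contains (pvMsetB toks) j = true ↔
      ∃ k : Nat, j = (k : Int) ∧ k + 1 < toks.length ∧
        pvMergeB (toks.getD k "") (toks.getD (k + 1) "") = true := by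
  rw [PySem.Set.contains_iff]
  unfold pvMsetB
  rw [PySem.Set.mem_ofList, List.mem_map]
  constructor
  · rintro ⟨p, hp, rfl⟩
    rw [List.mem_filter] at hp
    obtain ⟨hmem, hmerge⟩ := hp
    rw [PySem.List.mem_enumerate_iff] at hmem
    obtain ⟨k, hk, rfl⟩ := hmem
    have hlen : k + 1 < toks.length := by
      have := hk
      simp [List.length_zip, List.length_tail] at this
      omega
    refine ⟨k, by simp, hlen, ?_⟩
    have hz : (toks.zip toks.tail)[k] = (toks[k]'(by omega), toks.tail[k]'(by simp [List.length_tail]; omega)) := by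
      simp [List.getElem_zip]
    have ht : toks.tail[k]'(by simp [List.length_tail]; omega) = toks[k+1]'hlen := by
      simp [List.getElem_tail]
    rw [hz] at hmerge
    have hg0 : toks.getD k "" = toks[k]'(by omega) := List.getD_eq_getElem _ _ (by omega)
    have hg1 : toks.getD (k+1) "" = toks[k+1]'hlen := List.getD_eq_getElem _ _ hlen
    rw [hg0, hg1, ← ht]
    exact hmerge
  · rintro ⟨k, rfl, hlen, hm⟩
    have hk : k < (toks.zip toks.tail).length := by
      simp [List.length_zip, List.length_tail]; omega
    refine ⟨((k:Int), (toks.zip toks.tail)[k]), ?_, by simp⟩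
    rw [List.mem_filter]
    constructor
    · rw [PySem.List.mem_enumerate_iff]
      exact ⟨k, hk, by simp⟩
    · have hz : (toks.zip toks.tail)[k] = (toks[k]'(by omega), toks.tail[k]'(by simp [List.length_tail]; omega)) := by
        simp [List.getElem_zip]
      have ht : toks.tail[k]'(by simp [List.length_tail]; omega) = toks[k+1]'hlen := by
        simp [List.getElem_tail]
      rw [hz, ht]
      have hg0 : toks.getD k "" = toks[k]'(by omega) := List.getD_eq_getElem _ _ (by omega)
      have hg1 : toks.getD (k+1) "" = toks[k+1]'hlen := List.getD_eq_getElem _ _ hlen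
      rw [hg0, hg1] at hm
      exact hm

lemma contains_mset_nat (toks : List String) (i : Nat) :
    PySem.Set.contains (pvMsetB toks) (i : Int) = true ↔
      (i + 1 < toks.length ∧ pvMergeB (toks.getD i "") (toks.getD (i + 1) "") = true) := by
  rw [mem_mset_iff]
  constructor
  · rintro ⟨k, hk, h1, h2⟩
    have : k = i := by exact_mod_cast hk.symm
    subst this; exact ⟨h1, h2⟩
  · rintro ⟨h1, h2⟩
    exact ⟨i, rfl, h1, h2⟩

lemma no_overlap (toks : List String) (k : Nat)
    (h : PySem.Set.contains (pvMsetB toks) (k : Int) = true) :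
    PySem.Set.contains (pvMsetB toks) ((k : Int) + 1) = false := by
  cases hc : PySem.Set.contains (pvMsetB toks) ((k : Int) + 1) with
  | false => rfl
  | true =>
    exfalso
    rw [contains_mset_nat] at h
    have he : ((k : Int) + 1) = ((k + 1 : Nat) : Int) := by push_cast; ring
    rw [he, contains_mset_nat] at hc
    obtain ⟨_, hm1⟩ := h
    obtain ⟨_, hm2⟩ := hc
    simp only [pvMergeB, Bool.or_eq_true, Bool.and_eq_true, beq_iff_eq] at hm1 hm2
    rcases hm1 with ⟨_, hb⟩ | ⟨_, hb⟩ <;>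
      rw [hb] at hm2 <;> rcases hm2 with ⟨h', _⟩ | ⟨h', _⟩ <;> simp [pvStemsB] at h'

lemma not_contains_neg_one (toks : List String) :
    PySem.Set.contains (pvMsetB toks) ((0 : Int) - 1) = false := by
  cases hc : PySem.Set.contains (pvMsetB toks) ((0 : Int) - 1) with
  | false => rfl
  | true =>
    exfalso
    obtain ⟨k, hk, _, _⟩ := (mem_mset_iff toks _).mp hc
    omega

lemma loopA_eq_tailB (toks : List String) (i : Nat) (out : List String)
    (h : PySem.Set.contains (pvMsetB toks) ((i : Int) - 1) = false) :
    pvLoopA toks i out = out ++ pvTailB toks i := by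
  by_cases hi : i < toks.length
  · have hdrop : toks.drop i = toks[i] :: toks.drop (i + 1) := List.drop_eq_getElem_cons hi
    have hgetD : toks.getD i "" = toks[i] := List.getD_eq_getElem _ _ hi
    have htail : pvTailB toks i =
        (if PySem.Set.contains (pvMsetB toks) (i : Int) then toks[i] ++ toks.getD (i + 1) "" else toks[i]) ::
          ((PySem.List.enumerate (toks.drop (i + 1)) ((i + 1 : Nat) : Int)).filter
              (fun p => !(PySem.Set.contains (pvMsetB toks) (p.1 - 1)))).map
            (fun p => if PySem.Set.contains (pvMsetB toks) p.1 then p.2 ++ toks.getD (p.1 + 1).toNat "" else p.2) := by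
      unfold pvTailB
      rw [hdrop, PySem.List.enumerate_cons, List.filter_cons]
      have hcast1 : ((i : Int) + 1) = ((i + 1 : Nat) : Int) := by push_cast; ring
      have htn : ((i : Int) + 1).toNat = i + 1 := by omega
      simp only [h, Bool.not_false, if_pos, List.map_cons, hcast1, Int.toNat_natCast]
    by_cases h1 : i + 1 < toks.length
    · have hgetD1 : toks.getD (i + 1) "" = toks[i + 1] := List.getD_eq_getElem _ _ h1
      by_cases hmA : (toks.getD i "" ∈ pvStemsA ∧ toks.getD (i + 1) "" = "t") ∨
                     (toks.getD i "" = "let" ∧ toks.getD (i + 1) "" = "s")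
      · -- merge case
        have hmB : pvMergeB (toks.getD i "") (toks.getD (i + 1) "") = true := by
          simp only [pvMergeB, Bool.or_eq_true, Bool.and_eq_true, beq_iff_eq]
          rcases hmA with ⟨ha, hb⟩ | ⟨ha, hb⟩
          · exact Or.inl ⟨(PySem.Set.contains_iff _ _).mpr ha, hb⟩
          · exact Or.inr ⟨ha, hb⟩
        have hcm : PySem.Set.contains (pvMsetB toks) (i : Int) = true :=
          (contains_mset_nat toks i).mpr ⟨h1, hmB⟩
        -- the merged token is toks[i] ++ toks[i+1] in both branches
        have hmerged : (if PySem.Set.contains (pvMsetB toks) (i : Int) then toks[i] ++ toks.getD (i + 1) "" else toks[i])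
            = toks.getD i "" ++ toks.getD (i + 1) "" := by
          rw [hcm, if_pos rfl, hgetD]
        -- second element of the tail is filtered out
        have hdrop1 : toks.drop (i + 1) = toks[i + 1] :: toks.drop (i + 2) := List.drop_eq_getElem_cons h1
        have hfilt2 : ((PySem.List.enumerate (toks.drop (i + 1)) ((i + 1 : Nat) : Int)).filter
              (fun p => !(PySem.Set.contains (pvMsetB toks) (p.1 - 1)))) =
            ((PySem.List.enumerate (toks.drop (i + 2)) ((i + 2 : Nat) : Int)).filter
              (fun p => !(PySem.Set.contains (pvMsetB toks) (p.1 - 1)))) := by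
          rw [hdrop1, PySem.List.enumerate_cons, List.filter_cons]
          have : (((i + 1 : Nat) : Int) - 1) = (i : Int) := by push_cast; ring
          have hcast2 : (((i + 1 : Nat) : Int) + 1) = ((i + 2 : Nat) : Int) := by push_cast; ring
          simp only [this, hcm, Bool.not_true, if_neg, Bool.false_eq_true, not_false_iff, hcast2]
        have hnext : PySem.Set.contains (pvMsetB toks) (((i + 2 : Nat) : Int) - 1) = false := by
          have : (((i + 2 : Nat) : Int) - 1) = ((i : Int) + 1) := by push_cast; ring
          rw [this]; exact no_overlap toks i hcm
        have hIH := loopA_eq_tailB toks (i + 2)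
        rw [htail, hfilt2]
        rw [pvLoopA]
        simp only [hi, h1, if_pos]
        rcases hmA with ⟨ha, hb⟩ | ⟨ha, hb⟩
        · rw [if_pos ⟨ha, hb⟩]
          rw [hIH (out ++ [toks.getD i "" ++ "t"]) hnext]
          rw [hmerged, hb]
          simp [pvTailB]
        · rw [if_neg (fun hc => absurd (ha ▸ hc.1) (by decide)), if_pos ⟨ha, hb⟩]
          rw [hIH (out ++ ["lets"]) hnext]
          rw [hmerged, ha, hb]
          simp [pvTailB]
      · -- no merge at i
        push_neg at hmA
        have hmB : pvMergeB (toks.getD i "") (toks.getD (i + 1) "") = false := by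
          cases hb : pvMergeB (toks.getD i "") (toks.getD (i + 1) "") with
          | false => rfl
          | true =>
            exfalso
            simp only [pvMergeB, Bool.or_eq_true, Bool.and_eq_true, beq_iff_eq] at hb
            rcases hb with ⟨ha, hb'⟩ | ⟨ha, hb'⟩
            · exact hmA.1 ((PySem.Set.contains_iff _ _).mp ha) hb'
            · exact hmA.2 ha hb'
        have hcm : PySem.Set.contains (pvMsetB toks) (i : Int) = false := by
          cases hc : PySem.Set.contains (pvMsetB toks) (i : Int) with
          | false => rfl
          | true => exact (Bool.false_ne_true (hmB.symm.trans ((contains_mset_nat toks i).mp hc).2)).elim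
        have hnext : PySem.Set.contains (pvMsetB toks) (((i + 1 : Nat) : Int) - 1) = false := by
          have : (((i + 1 : Nat) : Int) - 1) = (i : Int) := by push_cast; ring
          rw [this]; exact hcm
        have hIH := loopA_eq_tailB toks (i + 1)
        rw [htail]
        rw [pvLoopA]
        simp only [hi, h1, if_pos]
        rw [if_neg (fun hc => hmA.1 hc.1 hc.2), if_neg (fun hc => hmA.2 hc.1 hc.2)]
        rw [hIH (out ++ [toks.getD i ""]) hnext]
        rw [hcm]
        simp [pvTailB, List.getElem?_eq_getElem hi]
    · -- last token
      have hcm : PySem.Set.contains (pvMsetB toks) (i : Int) = false := by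
        cases hc : PySem.Set.contains (pvMsetB toks) (i : Int) with
        | false => rfl
        | true => exact absurd ((contains_mset_nat toks i).mp hc).1 h1
      have hnext : PySem.Set.contains (pvMsetB toks) (((i + 1 : Nat) : Int) - 1) = false := by
        have : (((i + 1 : Nat) : Int) - 1) = (i : Int) := by push_cast; ring
        rw [this]; exact hcm
      have hIH := loopA_eq_tailB toks (i + 1)
      rw [htail]
      rw [pvLoopA]
      simp only [hi, h1, if_pos, if_false]
      rw [hIH (out ++ [toks.getD i ""]) hnext]
      rw [hcm]
      simp [pvTailB, List.getElem?_eq_getElem hi]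
  · have hdrop : toks.drop i = [] := List.drop_eq_nil_of_le (by omega)
    rw [pvLoopA]
    simp [hi, pvTailB, hdrop]
termination_by toks.length - i

-- ===== VERDICT (by name: the statement is the Claim_ definition above) =====
theorem fix_contractions_py_spec : Claim_equal_fix_contractions_py := by
  intro norm _
  unfold Spec_fix_contractions_py fix_contractions_py fix_contractions_py_alt
  rw [loopA_eq_tailB _ _ _ (not_contains_neg_one _)]
  simp [pvTailB]
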